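-- pv_equiv track=rewrite | github.com/PanchoGatti/lome_python | Utiles.py | evaluarSegundaRestriccion
-- ===== SOURCE A (Python) =====
-- def evaluarSegundaRestriccion(A, B):
--     n = len(A)  # Número de filas de A
--     m = len(B[0])  # Número de columnas de B
--
--     for i in range(n):
--         suma_columna_A = sum([fila[i] for fila in A])  # Suma de la columna i de A
--         suma_fila_B = sum(B[i])  # Suma de la fila i de B
--
--         if suma_columna_A != 0:
--             if suma_fila_B == 1:
--                 continue
--             else:
--                 return False
--         else:
--             if suma_fila_B == 0:
--                 continue
--             else:
--                 return False
--
--     return True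
-- ===== SOURCE B (Python) =====
-- def evaluarSegundaRestriccion(A, B):
--     n = len(A)
--     sumas_columnas = [0] * n
--     for fila in A:
--         sumas_columnas = [s + x for s, x in zip(sumas_columnas, fila)]
--     return all(sum(B[i]) == (1 if sumas_columnas[i] != 0 else 0) for i in range(n))
-- ===== Notes on version B (the rewrite author's own statement) =====
-- stated objective: simpler
-- what changed: B precomputes all column sums of A in one zip-accumulation pass and then checks them against sum(B[i]) with a single all(...) over an arithmetic target, instead of re-scanning A's column and branching through nested ifs with early returns inside every iteration.
import Mathlib
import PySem

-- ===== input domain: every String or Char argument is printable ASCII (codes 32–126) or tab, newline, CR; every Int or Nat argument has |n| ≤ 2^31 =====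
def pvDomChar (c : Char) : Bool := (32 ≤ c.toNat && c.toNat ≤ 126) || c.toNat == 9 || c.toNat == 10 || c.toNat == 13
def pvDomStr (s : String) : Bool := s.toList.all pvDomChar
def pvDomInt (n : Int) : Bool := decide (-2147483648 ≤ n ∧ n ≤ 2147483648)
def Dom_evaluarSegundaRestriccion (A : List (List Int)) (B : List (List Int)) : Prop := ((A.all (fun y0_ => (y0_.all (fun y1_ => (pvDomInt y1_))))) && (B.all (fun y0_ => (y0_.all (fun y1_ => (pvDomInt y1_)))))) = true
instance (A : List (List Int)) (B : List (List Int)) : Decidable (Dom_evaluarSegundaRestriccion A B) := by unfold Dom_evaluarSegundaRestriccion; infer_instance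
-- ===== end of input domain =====

-- B replaces A's per-index column re-scan and nested if/continue/return chain by one
-- zip-accumulation pass building all column sums, then a single all(...) check (objective: simpler).
-- Note: A's variable m = len(B[0]) is unused; its only effect (IndexError on empty B) lies outside Pre_.

-- ===== PORT A =====
-- the for-loop over range(n) with early 'return False' (getD is exact here: Pre_ puts every index in range)
def evalSegLoopA (A : List (List Int)) (B : List (List Int)) : List Nat → Bool
  | [] => true
  | i :: rest =>
      let sumaColA : Int := (A.map (fun fila => fila.getD i 0)).sum
      let sumaFilaB : Int := (B.getD i []).sum
      if sumaColA ≠ 0 then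
        (if sumaFilaB == 1 then evalSegLoopA A B rest else false)
      else
        (if sumaFilaB == 0 then evalSegLoopA A B rest else false)

def evaluarSegundaRestriccion (A : List (List Int)) (B : List (List Int)) : Bool :=
  evalSegLoopA A B (List.range A.length)

-- ===== PORT B =====
def evaluarSegundaRestriccion_alt (A : List (List Int)) (B : List (List Int)) : Bool :=
  let n := A.length
  let sumasColumnas := A.foldl (fun s fila => List.zipWith (· + ·) s fila) (List.replicate n 0)
  (List.range n).all (fun i =>
    (B.getD i []).sum == (if sumasColumnas.getD i 0 ≠ 0 then (1 : Int) else 0))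

-- ===== PRECONDITION & SPEC =====
-- Pre_ is A's exact domain (outside it A raises IndexError): B is nonempty, and either every
-- index 0..len(A)-1 is in range for all rows of A and for B, or some in-range index already
-- violates the constraint, so A returns False before reaching any out-of-range access.
def Pre_evaluarSegundaRestriccion (A : List (List Int)) (B : List (List Int)) : Prop :=
  B ≠ [] ∧
  (((∀ fila ∈ A, A.length ≤ fila.length) ∧ A.length ≤ B.length) ∨
    (∃ i, i < A.length ∧ (∀ fila ∈ A, i < fila.length) ∧ i < B.length ∧
      ¬ ((B.getD i []).sum = (if (A.map (fun fila => fila.getD i 0)).sum ≠ 0 then (1 : Int) else 0))))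
instance (A : List (List Int)) (B : List (List Int)) : Decidable (Pre_evaluarSegundaRestriccion A B) := by unfold Pre_evaluarSegundaRestriccion; infer_instance
def pvWitness_evaluarSegundaRestriccion : List (List Int) × List (List Int) := ([[1]], [[1]])

def Spec_evaluarSegundaRestriccion (A : List (List Int)) (B : List (List Int)) (out : Bool) : Prop := out = evaluarSegundaRestriccion_alt A B
instance (A : List (List Int)) (B : List (List Int)) (out : Bool) : Decidable (Spec_evaluarSegundaRestriccion A B out) := by unfold Spec_evaluarSegundaRestriccion; infer_instance

-- ===== CLAIM (what is proved, stated in full; the proofs are below) =====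
def Claim_equal_evaluarSegundaRestriccion : Prop := ∀ (A : List (List Int)) (B : List (List Int)), Dom_evaluarSegundaRestriccion A B → Pre_evaluarSegundaRestriccion A B → Spec_evaluarSegundaRestriccion A B (evaluarSegundaRestriccion A B)
-- ===== LEMMAS AND PROOFS =====

-- the accumulated value at an in-range index is init[i] plus the column sum
theorem foldl_zip_getD (A : List (List Int)) (init : List Int) (i : Nat)
    (h : ∀ fila ∈ A, i < fila.length) (hi : i < init.length) :
    (A.foldl (fun s fila => List.zipWith (· + ·) s fila) init).getD i 0
      = init.getD i 0 + (A.map (fun fila => fila.getD i 0)).sum := by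
  induction A generalizing init with
  | nil => simp
  | cons f rest ih =>
      have hif : i < f.length := h f (by simp)
      have hiz : i < (List.zipWith (· + ·) init f).length := by
        simp [List.length_zipWith]; omega
      have hz : (List.zipWith (· + ·) init f).getD i 0 = init.getD i 0 + f.getD i 0 := by
        rw [List.getD_eq_getElem _ _ hiz, List.getD_eq_getElem _ _ hi,
          List.getD_eq_getElem _ _ hif, List.getElem_zipWith]
      have := ih (List.zipWith (· + ·) init f)
        (fun fila hm => h fila (by simp [hm])) hiz
      rw [List.foldl_cons, this, hz, List.map_cons, List.sum_cons]
      ring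

-- pointwise-equal predicates give equal 'all'
theorem pvAllCongr {α : Type} (l : List α) {p q : α → Bool}
    (h : ∀ x ∈ l, p x = q x) : l.all p = l.all q := by
  induction l with
  | nil => rfl
  | cons x rest ih => simp_all [List.all_cons]

-- A's early-return loop is the same as 'all' of the per-index check
theorem evalSegLoopA_eq_all (A B : List (List Int)) (l : List Nat) :
    evalSegLoopA A B l = l.all (fun i =>
      (B.getD i []).sum == (if (A.map (fun fila => fila.getD i 0)).sum ≠ 0 then (1 : Int) else 0)) := by
  induction l with
  | nil => rfl
  | cons i rest ih =>
      rw [List.all_cons, ← ih]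
      show (if (A.map (fun fila => fila.getD i 0)).sum ≠ 0 then
              (if (B.getD i []).sum == 1 then evalSegLoopA A B rest else false)
            else
              (if (B.getD i []).sum == 0 then evalSegLoopA A B rest else false)) = _
      by_cases hc : (A.map (fun fila => fila.getD i 0)).sum = 0 <;>
        by_cases hb1 : (B.getD i []).sum = 1 <;>
        by_cases hb0 : (B.getD i []).sum = 0 <;>
        simp_all

-- ===== VERDICT (by name: the statement is the Claim_ definition above) =====
theorem evaluarSegundaRestriccion_spec : Claim_equal_evaluarSegundaRestriccion := by
  intro A B _ hPre
  obtain ⟨-, hCase⟩ := hPre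
  show evaluarSegundaRestriccion A B = evaluarSegundaRestriccion_alt A B
  unfold evaluarSegundaRestriccion evaluarSegundaRestriccion_alt
  rw [evalSegLoopA_eq_all]
  rcases hCase with ⟨hRows, -⟩ | ⟨i, hin, hRows, -, hfail⟩
  · -- every index in range: the two per-index checks agree everywhere on range n
    apply pvAllCongr
    intro i hi
    have hi' : i < A.length := List.mem_range.mp hi
    have hcols := foldl_zip_getD A (List.replicate A.length 0) i
      (fun fila hm => lt_of_lt_of_le hi' (hRows fila hm)) (by simpa using hi')
    have hzero : (List.replicate A.length (0 : Int)).getD i 0 = 0 := by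
      rw [List.getD_eq_getElem _ _ (by simpa using hi')]; simp
    rw [hcols, hzero, zero_add]
  · -- some in-range index fails the check: both 'all's are false at that index
    have hcols := foldl_zip_getD A (List.replicate A.length 0) i hRows (by simpa using hin)
    have hzero : (List.replicate A.length (0 : Int)).getD i 0 = 0 := by
      rw [List.getD_eq_getElem _ _ (by simpa using hin)]; simp
    have hmem : i ∈ List.range A.length := List.mem_range.mpr hin
    have h1 : (List.range A.length).all (fun i =>
        (B.getD i []).sum == (if (A.map (fun fila => fila.getD i 0)).sum ≠ 0 then (1 : Int) else 0)) = false :=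
      List.all_eq_false.mpr ⟨i, hmem, by simpa [beq_iff_eq] using hfail⟩
    have h2 : (List.range A.length).all (fun j =>
        (B.getD j []).sum == (if ((A.foldl (fun s fila => List.zipWith (· + ·) s fila)
            (List.replicate A.length 0)).getD j 0) ≠ 0 then (1 : Int) else 0)) = false :=
      List.all_eq_false.mpr ⟨i, hmem, by
        simp only [hcols, hzero, zero_add]
        simpa [beq_iff_eq] using hfail⟩
    rw [h1]
    exact h2.symm
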